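-- pv_equiv track=rewrite | github.com/matheuscordeiro/random-problems | Cracking the Coding Interview/Cap 17/17.18_shortest_supersequence.py | find_shortest_distance
-- ===== SOURCE A (Python) =====
-- def find_shortest_distance(positions, size):
--     best_start = best_size = -1
--     for i in range(size):
--         max_diff = -1
--         for _, array in positions.items():
--             if array[i] == -1:
--                 max_diff = -1
--                 break
--             max_diff = max(max_diff, array[i])
--
--         if max_diff == -1:
--             continue
--
--         if best_start == -1:
--             best_size = max_diff-i
--             best_start = i
--         elif best_size > max_diff-i:
--             best_size = max_diff-i
--             best_start = i
--
--     return best_start, best_size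
-- ===== SOURCE B (Python) =====
-- def find_shortest_distance(positions, size):
--     n = max(size, 0)
--     # transposed traversal: fold over arrays (rows), maintaining per-column (peak, valid)
--     cols = [(-1, True)] * n
--     for array in positions.values():
--         cols = [(p, False) if array[i] == -1 else ((array[i], ok) if array[i] > p else (p, ok))
--                 for i, (p, ok) in enumerate(cols)]
--     best_start = best_size = -1
--     for i, (p, ok) in enumerate(cols):
--         if ok and p != -1:
--             d = p - i
--             if best_start == -1 or d < best_size:
--                 best_start, best_size = i, d
--     return best_start, best_size
-- ===== Notes on version B (the rewrite author's own statement) =====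
-- stated objective: alternative
-- what changed: Transposed traversal: B folds over the arrays (rows) maintaining a per-column (peak, valid) table, then makes one scan over the columns, instead of A's index-first outer loop with an inner scan over all arrays and a break.
-- outside the precondition, e.g. on find_shortest_distance({'a': [-1], 'b': []}, 1): A returns (-1, -1), B raises IndexError
import Mathlib
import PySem

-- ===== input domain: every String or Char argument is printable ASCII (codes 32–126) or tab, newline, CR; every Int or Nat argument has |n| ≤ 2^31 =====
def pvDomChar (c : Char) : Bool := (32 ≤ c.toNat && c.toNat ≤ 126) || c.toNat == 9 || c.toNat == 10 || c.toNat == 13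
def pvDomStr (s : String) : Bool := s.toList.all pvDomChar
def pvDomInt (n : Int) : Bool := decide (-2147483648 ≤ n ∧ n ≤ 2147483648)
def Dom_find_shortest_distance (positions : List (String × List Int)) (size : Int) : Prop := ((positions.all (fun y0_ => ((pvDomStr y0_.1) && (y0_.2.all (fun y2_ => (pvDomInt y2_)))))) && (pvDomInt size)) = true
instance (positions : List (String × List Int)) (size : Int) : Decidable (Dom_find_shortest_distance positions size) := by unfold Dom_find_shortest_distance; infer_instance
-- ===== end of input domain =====

-- B traverses transposed: it folds over the arrays (rows) maintaining a per-column (peak, valid)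
-- table and then scans the columns once, instead of A's index-first loop with an inner array scan
-- and break (objective: alternative).


-- ===== PORT A =====
-- the inner 'for _, array in positions.items():' loop with its break;
-- array[i] is in range under Pre_, so pyGetD's default is never consulted there
def pvInnerA : List (String × List Int) → Int → Int → Int
  | [], _, max_diff => max_diff
  | (_, array) :: rest, i, max_diff =>
    if PySem.List.pyGetD array i 0 = -1 then -1
    else pvInnerA rest i (max max_diff (PySem.List.pyGetD array i 0))

-- the outer 'for i in range(size):' loop; state = (best_start, best_size)
def pvLoopA (positions : List (String × List Int)) : List Int → Int × Int → Int × Int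
  | [], st => st
  | i :: rest, st =>
    let max_diff := pvInnerA positions i (-1)
    pvLoopA positions rest
      (if max_diff = -1 then st
       else if st.1 = -1 then (i, max_diff - i)
       else if st.2 > max_diff - i then (i, max_diff - i)
       else st)

def find_shortest_distance (positions : List (String × List Int)) (size : Int) : Int × Int :=
  pvLoopA positions (PySem.List.pyRange 0 size 1) (-1, -1)

-- ===== PORT B =====
-- one row of B's transposed fold: the per-column comprehension over enumerate(cols)
def pvRowStep (array : List Int) (cols : List (Int × Bool)) : List (Int × Bool) :=
  cols.mapIdx (fun i pc =>
    let v := PySem.List.pyGetD array (Int.ofNat i) 0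
    if v = -1 then (pc.1, false) else if v > pc.1 then (v, pc.2) else pc)

-- B's final 'for i, (p, ok) in enumerate(cols):' scan
def pvFinal : List (Int × Bool) → Int → Int × Int → Int × Int
  | [], _, best => best
  | pc :: rest, i, best =>
    pvFinal rest (i + 1)
      (if pc.2 = true ∧ pc.1 ≠ -1 then
         (if best.1 = -1 ∨ pc.1 - i < best.2 then (i, pc.1 - i) else best)
       else best)

def find_shortest_distance_alt (positions : List (String × List Int)) (size : Int) : Int × Int :=
  pvFinal
    ((positions.map (·.2)).foldl (fun cols arr => pvRowStep arr cols)
      (List.replicate (max size 0).toNat (-1, true)))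
    0 (-1, -1)

-- ===== PRECONDITION & SPEC =====
-- Pre_ requires every array to have length ≥ size (for positive size): A indexes array[i] for each
-- i in range(size) and raises IndexError on a shorter array — except that A still returns when an
-- earlier array's -1 breaks the column scan before the short array is indexed (an accident of the
-- break); B raises IndexError there too, so those inputs are excluded.
def Pre_find_shortest_distance (positions : List (String × List Int)) (size : Int) : Prop :=
  size ≤ 0 ∨ ∀ p ∈ positions, size ≤ (p.2.length : Int)
instance (positions : List (String × List Int)) (size : Int) : Decidable (Pre_find_shortest_distance positions size) := by unfold Pre_find_shortest_distance; infer_instance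

def pvWitness_find_shortest_distance : (List (String × List Int)) × Int :=
  ([("a", [1, 2]), ("b", [3, 0])], 2)

def Spec_find_shortest_distance (positions : List (String × List Int)) (size : Int) (out : Int × Int) : Prop := out = find_shortest_distance_alt positions size
instance (positions : List (String × List Int)) (size : Int) (out : Int × Int) : Decidable (Spec_find_shortest_distance positions size out) := by unfold Spec_find_shortest_distance; infer_instance

-- ===== CLAIM (what is proved, stated in full; the proofs are below) =====
def Claim_equal_find_shortest_distance : Prop := ∀ (positions : List (String × List Int)) (size : Int), Dom_find_shortest_distance positions size → Pre_find_shortest_distance positions size → Spec_find_shortest_distance positions size (find_shortest_distance positions size)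

-- ===== LEMMAS AND PROOFS =====

-- the column of values at index i across all arrays
def pvCol (arrays : List (List Int)) (i : Int) : List Int :=
  arrays.map (fun a => PySem.List.pyGetD a i 0)

-- the state of one column under B's per-row updates, folded over that column's values
def pvColAcc : List Int → Int × Bool → Int × Bool
  | [], s => s
  | v :: vs, s => pvColAcc vs (if v = -1 then (s.1, false) else if v > s.1 then (v, s.2) else s)

-- A's inner break loop computes: -1 if the column contains -1, else the running max
lemma pvInnerA_eq (i : Int) (ps : List (String × List Int)) (md : Int) :
    pvInnerA ps i md =
      if (-1) ∈ pvCol (ps.map (·.2)) i then -1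
      else (pvCol (ps.map (·.2)) i).foldl max md := by
  induction ps generalizing md with
  | nil => simp [pvInnerA, pvCol]
  | cons p rest ih =>
    simp only [pvInnerA, pvCol, List.map_cons, List.mem_cons, List.foldl_cons]
    by_cases h : PySem.List.pyGetD p.2 i 0 = -1
    · simp [h]
    · have : ¬ (-1 = PySem.List.pyGetD p.2 i 0) := fun hh => h hh.symm
      simp only [if_neg h, pvCol] at ih ⊢
      simp only [ih, this, false_or]

lemma pvRowStep_length (a : List Int) (cols : List (Int × Bool)) :
    (pvRowStep a cols).length = cols.length := by
  simp [pvRowStep]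

lemma pvFold_length (arrays : List (List Int)) (cols : List (Int × Bool)) :
    (arrays.foldl (fun c a => pvRowStep a c) cols).length = cols.length := by
  induction arrays generalizing cols with
  | nil => rfl
  | cons a rest ih => simp [List.foldl_cons, ih, pvRowStep_length]

lemma pvFold_getElem (arrays : List (List Int)) (cols : List (Int × Bool)) (k : Nat)
    (hk : k < cols.length) :
    (arrays.foldl (fun c a => pvRowStep a c) cols)[k]'(by rw [pvFold_length]; exact hk)
      = pvColAcc (pvCol arrays (Int.ofNat k)) cols[k] := by
  induction arrays generalizing cols with
  | nil => simp [pvCol, pvColAcc]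
  | cons a rest ih =>
    simp only [List.foldl_cons]
    have hk' : k < (pvRowStep a cols).length := by rw [pvRowStep_length]; exact hk
    rw [ih (pvRowStep a cols) hk']
    have : (pvRowStep a cols)[k]'hk' =
        (let v := PySem.List.pyGetD a (Int.ofNat k) 0
         if v = -1 then ((cols[k]'hk).1, false)
         else if v > (cols[k]'hk).1 then (v, (cols[k]'hk).2) else cols[k]'hk) := by
      simp [pvRowStep, List.getElem_mapIdx]
    rw [this]
    simp only [pvCol, List.map_cons]
    rfl

-- the per-column fold equals (running max, "no -1 seen")
lemma pvColAcc_eq (vs : List Int) (p : Int) (ok : Bool) (hp : -1 ≤ p) :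
    pvColAcc vs (p, ok) = (vs.foldl max p, ok && decide ((-1 : Int) ∉ vs)) := by
  induction vs generalizing p ok with
  | nil => simp [pvColAcc]
  | cons v vs ih =>
    simp only [pvColAcc, List.foldl_cons, List.mem_cons]
    by_cases hv : v = -1
    · subst hv
      rw [if_pos rfl, ih p false hp, show max p (-1) = p by omega]
      simp
    · rw [if_neg hv]
      have hne : ((-1 : Int) = v) = False := by
        simp only [eq_iff_iff, iff_false]
        exact fun h => hv h.symm
      by_cases hgt : v > p
      · rw [if_pos hgt, ih v ok (by omega), show max p v = v by omega]
        simp [hne]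
      · rw [if_neg hgt, ih p ok hp, show max p v = p by omega]
        simp [hne]

-- the folded table, written as a map over the column indices
lemma pvFold_eq (arrays : List (List Int)) (n : Nat) :
    arrays.foldl (fun c a => pvRowStep a c) (List.replicate n ((-1 : Int), true))
      = (List.range' 0 n).map
          (fun k => ((pvCol arrays (Int.ofNat k)).foldl max (-1),
                     decide ((-1 : Int) ∉ pvCol arrays (Int.ofNat k)))) := by
  apply List.ext_getElem
  · rw [pvFold_length]; simp
  · intro k h1 h2
    have hk : k < n := by simpa using h2
    rw [pvFold_getElem arrays _ k (by simpa using hk)]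
    rw [List.getElem_replicate, pvColAcc_eq _ _ _ (by omega)]
    simp [List.getElem_range']

-- A's outer loop over indices j..j+m-1 equals B's final scan over the table rows j..j+m-1
lemma pvLoop_final (positions : List (String × List Int)) (m : Nat) :
    ∀ (j : Nat) (best : Int × Int),
      pvLoopA positions ((List.range' j m).map Int.ofNat) best
        = pvFinal
            ((List.range' j m).map
              (fun k => ((pvCol (positions.map (·.2)) (Int.ofNat k)).foldl max (-1),
                         decide ((-1 : Int) ∉ pvCol (positions.map (·.2)) (Int.ofNat k)))))
            (Int.ofNat j) best := by
  induction m with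
  | zero => intro j best; rfl
  | succ m ih =>
    intro j best
    rw [List.range'_succ]
    simp only [List.map_cons, pvLoopA, pvFinal]
    rw [pvInnerA_eq]
    set col := pvCol (positions.map (·.2)) (Int.ofNat j) with hcol
    have hcast : (Int.ofNat j) + 1 = Int.ofNat (j + 1) := by simp
    rw [hcast, ih (j + 1)]
    congr 1
    by_cases hmem : (-1) ∈ col
    · rw [if_pos hmem, if_pos rfl,
        if_neg (fun h => (of_decide_eq_true h.1) hmem)]
    · rw [if_neg hmem]
      by_cases hpk : col.foldl max (-1) = -1
      · rw [if_pos hpk, if_neg (fun h => h.2 hpk)]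
      · rw [if_neg hpk, if_pos (⟨decide_eq_true hmem, hpk⟩ :
          decide ((-1 : Int) ∉ col) = true ∧ col.foldl max (-1) ≠ -1)]
        by_cases hb1 : best.1 = -1
        · rw [if_pos hb1, if_pos (Or.inl hb1)]
        · rw [if_neg hb1]
          by_cases hlt : col.foldl max (-1) - Int.ofNat j < best.2
          · rw [if_pos hlt, if_pos (Or.inr hlt)]
          · rw [if_neg hlt, if_neg (fun h => h.elim hb1 hlt)]

-- ===== VERDICT (by name: the statement is the Claim_ definition above) =====
theorem find_shortest_distance_spec : Claim_equal_find_shortest_distance := by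
  intro positions size _hdom _hpre
  unfold Spec_find_shortest_distance find_shortest_distance find_shortest_distance_alt
  have hr : PySem.List.pyRange 0 size 1 = (List.range' 0 size.toNat).map Int.ofNat := by
    apply List.ext_getElem
    · simp [PySem.List.length_pyRange_one]
    · intro k h1 h2
      rw [PySem.List.getElem_pyRange_one]
      simp [List.getElem_range']
  rw [hr, show (max size 0).toNat = size.toNat by omega, pvFold_eq, pvLoop_final]
  rfl
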